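-- pv_equiv track=rewrite | github.com/mgf2222/IBI1_2024-25 | Practical7/spliced_tata_gene.py | extract_gene_name
-- ===== SOURCE A (Python) =====
-- def extract_gene_name(header_line):
--     parts = header_line.split()
--     for part in parts:
--         if part.startswith('gene:'):
--             gene_part = part.split(':')
--             if len(gene_part) >= 2:
--                 return gene_part[1]
--     return None
-- ===== SOURCE B (Python) =====
-- def extract_gene_name(header_line):
--     n = len(header_line)
--     i = 0
--     while i < n:
--         if header_line[i].isspace():
--             i += 1
--         elif header_line.startswith('gene:', i):
--             j = i + 5
--             k = j
--             while k < n and not header_line[k].isspace() and header_line[k] != ':':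
--                 k += 1
--             return header_line[j:k]
--         else:
--             while i < n and not header_line[i].isspace():
--                 i += 1
--     return None
-- ===== Notes on version B (the rewrite author's own statement) =====
-- stated objective: alternative
-- what changed: Replaced the split()-into-a-token-list + per-token split(':') passes by a single left-to-right character scan that checks 'gene:' at each token start and slices the name out in place, allocating no token lists.
import Mathlib
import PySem

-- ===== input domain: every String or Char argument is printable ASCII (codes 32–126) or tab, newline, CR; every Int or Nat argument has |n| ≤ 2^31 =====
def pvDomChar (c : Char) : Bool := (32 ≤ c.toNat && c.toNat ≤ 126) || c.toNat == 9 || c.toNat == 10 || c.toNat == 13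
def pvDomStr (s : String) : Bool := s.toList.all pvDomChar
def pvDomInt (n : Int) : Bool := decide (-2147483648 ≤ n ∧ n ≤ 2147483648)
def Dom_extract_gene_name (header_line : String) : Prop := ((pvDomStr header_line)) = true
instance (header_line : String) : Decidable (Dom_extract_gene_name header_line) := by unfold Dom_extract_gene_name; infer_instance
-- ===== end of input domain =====

-- B replaces A's split()-into-tokens + per-token split(':') passes by a single in-place
-- character scan (alternative decomposition, no token lists allocated); same O(n) cost.

-- ===== PORT A =====
-- A: split header into whitespace tokens, scan for the first token starting with 'gene:',
--    split that token on ':' and return element 1.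
def extractA_go : List (List Char) → Option String
  | [] => none
  | p :: rest =>
    if PySem.Chars.startswith p ['g', 'e', 'n', 'e', ':'] then
      let gene_part := PySem.Chars.splitOn p [':']
      if 2 ≤ gene_part.length then (PySem.List.pyGet? gene_part 1).map String.ofList
      else extractA_go rest
    else extractA_go rest

def extract_gene_name (header_line : String) : Option String :=
  extractA_go (PySem.Chars.split₀ header_line.toList)

-- ===== PORT B =====
-- B: one character scan; at each token start test 'gene:' in place and slice the name out.
def pvNonWs (c : Char) : Bool := !PySem.Chars.isspace c

def pvNameChar (c : Char) : Bool := pvNonWs c && c != ':'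

def extractB_go : List Char → Option String
  | [] => none
  | c :: cs =>
    if PySem.Chars.isspace c then extractB_go cs          -- i += 1 over whitespace
    else if PySem.Chars.startswith (c :: cs) ['g', 'e', 'n', 'e', ':'] then
      -- inner while: advance k while not whitespace and not ':', return the slice [j:k]
      some (String.ofList (((c :: cs).drop 5).takeWhile pvNameChar))
    else extractB_go (cs.dropWhile pvNonWs)               -- skip rest of this token
termination_by cs => cs.length
decreasing_by
  · simp
  · have := List.length_dropWhile_le pvNonWs cs
    simp; omega

def extract_gene_name_alt (header_line : String) : Option String :=
  extractB_go header_line.toList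

-- ===== PRECONDITION & SPEC =====
def Spec_extract_gene_name (header_line : String) (out : Option String) : Prop := out = extract_gene_name_alt header_line
instance (header_line : String) (out : Option String) : Decidable (Spec_extract_gene_name header_line out) := by unfold Spec_extract_gene_name; infer_instance

-- ===== CLAIM (what is proved, stated in full; the proofs are below) =====
def Claim_equal_extract_gene_name : Prop := ∀ (header_line : String), Dom_extract_gene_name header_line → Spec_extract_gene_name header_line (extract_gene_name header_line)

-- ===== LEMMAS AND PROOFS =====

-- split₀.go: the accumulator prepends reversed.
lemma split0_go_acc (l : List Char) : ∀ (cur : List Char) (acc : List (List Char)),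
    PySem.Chars.split₀.go l cur acc = acc.reverse ++ PySem.Chars.split₀.go l cur [] := by
  induction l with
  | nil =>
    intro cur acc
    simp only [PySem.Chars.split₀.go]
    split <;> simp
  | cons c rest ih =>
    intro cur acc
    simp only [PySem.Chars.split₀.go]
    split
    · split
      · rw [ih [] acc]
      · rw [ih [] (cur.reverse :: acc), ih [] [cur.reverse]]
        simp
    · rw [ih (c :: cur) acc]

lemma split0_nil : PySem.Chars.split₀ [] = [] := rfl

lemma split0_ws {c : Char} (cs : List Char) (h : PySem.Chars.isspace c = true) :
    PySem.Chars.split₀ (c :: cs) = PySem.Chars.split₀ cs := by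
  simp [PySem.Chars.split₀, PySem.Chars.split₀.go, h]

lemma split0_go_tok (l : List Char) : ∀ (cur : List Char), cur ≠ [] →
    PySem.Chars.split₀.go l cur [] =
      (cur.reverse ++ l.takeWhile pvNonWs) :: PySem.Chars.split₀ (l.dropWhile pvNonWs) := by
  induction l with
  | nil =>
    intro cur hcur
    simp [PySem.Chars.split₀.go, split0_nil, List.isEmpty_iff, hcur]
  | cons c rest ih =>
    intro cur hcur
    by_cases hc : PySem.Chars.isspace c = true
    · simp only [PySem.Chars.split₀.go, hc, if_pos, List.isEmpty_iff, hcur, if_false]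
      rw [split0_go_acc rest [] [cur.reverse]]
      have ht : List.takeWhile pvNonWs (c :: rest) = [] := by
        simp [pvNonWs, hc]
      have hd : List.dropWhile pvNonWs (c :: rest) = c :: rest := by
        simp [pvNonWs, hc]
      rw [ht, hd, split0_ws rest hc]
      simp [PySem.Chars.split₀]
    · have hc' : PySem.Chars.isspace c = false := by simpa using hc
      simp only [PySem.Chars.split₀.go, hc', Bool.false_eq_true, if_false]
      rw [ih (c :: cur) (by simp)]
      simp [pvNonWs, hc']

lemma split0_tok {c : Char} (cs : List Char) (h : PySem.Chars.isspace c = false) :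
    PySem.Chars.split₀ (c :: cs) =
      (c :: cs.takeWhile pvNonWs) :: PySem.Chars.split₀ (cs.dropWhile pvNonWs) := by
  have : PySem.Chars.split₀ (c :: cs) = PySem.Chars.split₀.go cs [c] [] := by
    simp [PySem.Chars.split₀, PySem.Chars.split₀.go, h]
  rw [this, split0_go_tok cs [c] (by simp)]
  simp

-- splitOn.go (sep = ":"): accumulator lemma.
lemma splitOn_go_acc (sep : List Char) : ∀ (fuel : Nat) (l cur : List Char) (acc : List (List Char)),
    PySem.Chars.splitOn.go sep fuel l cur acc = acc.reverse ++ PySem.Chars.splitOn.go sep fuel l cur [] := by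
  intro fuel
  induction fuel with
  | zero => intro l cur acc; simp [PySem.Chars.splitOn.go]
  | succ fuel ih =>
    intro l cur acc
    cases l with
    | nil => simp [PySem.Chars.splitOn.go]
    | cons c rest =>
      simp only [PySem.Chars.splitOn.go]
      split
      · rw [ih _ [] (cur.reverse :: acc), ih _ [] [cur.reverse]]
        simp
      · rw [ih rest (c :: cur) acc]

-- splitOn.go (sep = ":"): the first piece produced is cur.reverse ++ takeWhile (· ≠ ':').
lemma splitOn_go_first : ∀ (fuel : Nat) (t cur : List Char), t.length < fuel →
    ∃ r, PySem.Chars.splitOn.go [':'] fuel t cur [] =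
      (cur.reverse ++ t.takeWhile (fun d => d != ':')) :: r := by
  intro fuel
  induction fuel with
  | zero => intro t cur h; omega
  | succ fuel ih =>
    intro t cur h
    cases t with
    | nil => exact ⟨[], by simp [PySem.Chars.splitOn.go]⟩
    | cons c rest =>
      by_cases hc : c = ':'
      · subst hc
        refine ⟨PySem.Chars.splitOn.go [':'] fuel rest [] [], ?_⟩
        simp only [PySem.Chars.splitOn.go, List.isPrefixOf_cons₂]
        rw [if_pos (by simp)]
        rw [show List.drop [':'].length (':' :: rest) = rest from rfl]
        rw [splitOn_go_acc [':'] fuel rest [] [cur.reverse]]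
        simp
      · have hc' : (c == ':') = false := by simpa using hc
        have hc2 : ¬(':' = c) := fun h => hc h.symm
        obtain ⟨r, hr⟩ := ih rest (c :: cur) (by simp at h; omega)
        refine ⟨r, ?_⟩
        simp only [PySem.Chars.splitOn.go, List.isPrefixOf_cons₂]
        rw [hr]
        simp [hc, hc2]

-- splitOn.go stepping lemmas for sep = ":"
lemma goc_step {c : Char} (hc : (c == ':') = false) (fuel : Nat) (rest cur : List Char)
    (acc : List (List Char)) :
    PySem.Chars.splitOn.go [':'] (fuel + 1) (c :: rest) cur acc =
      PySem.Chars.splitOn.go [':'] fuel rest (c :: cur) acc := by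
  have hc2 : ¬(':' = c) := fun h => by simp [← h] at hc
  simp [PySem.Chars.splitOn.go, List.isPrefixOf_cons₂, hc2]

lemma goc_colon (fuel : Nat) (rest cur : List Char) (acc : List (List Char)) :
    PySem.Chars.splitOn.go [':'] (fuel + 1) (':' :: rest) cur acc =
      PySem.Chars.splitOn.go [':'] fuel rest [] (cur.reverse :: acc) := by
  simp only [PySem.Chars.splitOn.go, List.isPrefixOf_cons₂]
  rw [if_pos (by simp)]
  simp

-- splitting 'gene:'-prefixed token on ':' : piece 0 is "gene", piece 1 is the name
lemma splitOn_gene (t : List Char) :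
    ∃ r, PySem.Chars.splitOn ('g'::'e'::'n'::'e'::':'::t) [':'] =
      ['g','e','n','e'] :: (t.takeWhile (fun d => d != ':')) :: r := by
  unfold PySem.Chars.splitOn
  simp only [List.length_cons]
  rw [goc_step (by decide), goc_step (by decide), goc_step (by decide), goc_step (by decide),
    goc_colon]
  rw [splitOn_go_acc]
  obtain ⟨r, hr⟩ := splitOn_go_first (t.length + 1) t [] (by omega)
  rw [hr]
  exact ⟨r, by simp⟩

lemma takeWhile_gene (u : List Char) :
    ('e'::'n'::'e'::':'::u).takeWhile pvNonWs = 'e'::'n'::'e'::':'::(u.takeWhile pvNonWs) := by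
  simp [pvNonWs,
    show PySem.Chars.isspace 'e' = false from by decide,
    show PySem.Chars.isspace 'n' = false from by decide,
    show PySem.Chars.isspace ':' = false from by decide]

lemma takeWhile_name (u : List Char) :
    (u.takeWhile pvNonWs).takeWhile (fun d => d != ':') = u.takeWhile pvNameChar := by
  rw [List.takeWhile_takeWhile]
  congr 1
  funext a
  cases h1 : PySem.Chars.isspace a <;> cases h2 : a == ':' <;>
    simp_all [pvNameChar, pvNonWs, bne]

lemma main_lemma : ∀ (n : Nat) (cs : List Char), cs.length ≤ n →
    extractA_go (PySem.Chars.split₀ cs) = extractB_go cs := by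
  intro n
  induction n with
  | zero =>
    intro cs h
    have hnil : cs = [] := by cases cs <;> simp_all
    subst hnil
    simp [split0_nil, extractA_go, extractB_go]
  | succ n ih =>
    intro cs h
    cases cs with
    | nil => simp [split0_nil, extractA_go, extractB_go]
    | cons c cs =>
      by_cases hws : PySem.Chars.isspace c = true
      · rw [split0_ws cs hws,
          show extractB_go (c :: cs) = extractB_go cs from by simp [extractB_go, hws]]
        exact ih cs (by simp at h; omega)
      · have hws' : PySem.Chars.isspace c = false := by simpa using hws
        rw [split0_tok cs hws']
        by_cases hpre : PySem.Chars.startswith (c :: cs) ['g','e','n','e',':'] = true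
        · obtain ⟨u, hu⟩ := (PySem.Chars.startswith_iff _ _).mp hpre
          obtain ⟨h1, h2⟩ := List.cons.inj hu
          subst h1; subst h2
          have hcs : (['e','n','e',':'].append u) = 'e'::'n'::'e'::':'::u := rfl
          rw [hcs] at hpre ⊢
          rw [takeWhile_gene]
          obtain ⟨r, hr⟩ := splitOn_gene (u.takeWhile pvNonWs)
          have hswA : PySem.Chars.startswith
              ('g'::'e'::'n'::'e'::':'::(List.takeWhile pvNonWs u)) ['g','e','n','e',':'] = true :=
            (PySem.Chars.startswith_iff _ _).mpr ⟨_, rfl⟩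
          simp only [extractA_go, extractB_go, hswA, hpre, if_true,
            show PySem.Chars.isspace 'g' = false from by decide, Bool.false_eq_true, if_false, hr]
          simp [PySem.List.pyGet?, PySem.List.pyIdx?, takeWhile_name]
        · have hpre' : PySem.Chars.startswith (c :: cs) ['g','e','n','e',':'] = false :=
            Bool.eq_false_iff.mpr hpre
          have htokpre : (c :: cs.takeWhile pvNonWs) <+: (c :: cs) :=
            ⟨cs.dropWhile pvNonWs, by simp [List.takeWhile_append_dropWhile]⟩
          have htok : PySem.Chars.startswith (c :: cs.takeWhile pvNonWs) ['g','e','n','e',':'] = false := by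
            refine Bool.eq_false_iff.mpr fun hx => hpre ?_
            exact (PySem.Chars.startswith_iff _ _).mpr
              (((PySem.Chars.startswith_iff _ _).mp hx).trans htokpre)
          simp only [extractA_go, extractB_go, htok, hws', hpre', Bool.false_eq_true, if_false]
          exact ih (cs.dropWhile pvNonWs)
            (by have := List.length_dropWhile_le pvNonWs cs; simp at h; omega)

-- ===== VERDICT (by name: the statement is the Claim_ definition above) =====
theorem extract_gene_name_spec : Claim_equal_extract_gene_name := by
  intro header_line _
  unfold Spec_extract_gene_name extract_gene_name extract_gene_name_alt
  exact main_lemma header_line.toList.length header_line.toList le_rfl
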